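-- pv_equiv track=rewrite | github.com/mborsodi/contour-project | queries.py | COM_matrix
-- ===== SOURCE A (Python) =====
-- def COM_matrix(contour):
--
--     com = []
--     for x in contour:
--         com.append([])
--
--     for i in range(len(contour)):
--         for x in range(len(contour)):
--             if contour[i] == contour[x]:
--                 com[i].append("0")
--             elif contour[i] > contour[x]:
--                 com[i].append("-")
--             else:
--                 com[i].append("+")
--
--     return com
-- ===== SOURCE B (Python) =====
-- _FLIP = {"0": "0", "-": "+", "+": "-"}
--
-- def COM_matrix(contour):
--     # Triangular pass: compute each comparison once for x >= i, and derive the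
--     # lower-triangle entries by flipping the already-computed mirror entries.
--     n = len(contour)
--     rows = []
--     for i in range(n):
--         row = [_FLIP[rows[x][i]] for x in range(i)]
--         for x in range(i, n):
--             if contour[i] == contour[x]:
--                 row.append("0")
--             elif contour[i] > contour[x]:
--                 row.append("-")
--             else:
--                 row.append("+")
--         rows.append(row)
--     return rows
-- ===== Notes on version B (the rewrite author's own statement) =====
-- stated objective: alternative
-- what changed: Replaces the two full nested passes (n^2 comparisons) by one triangular pass that compares each pair once for x >= i and derives the lower-triangle entries by flipping the already-computed mirror entries via a lookup table.
import Mathlib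
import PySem

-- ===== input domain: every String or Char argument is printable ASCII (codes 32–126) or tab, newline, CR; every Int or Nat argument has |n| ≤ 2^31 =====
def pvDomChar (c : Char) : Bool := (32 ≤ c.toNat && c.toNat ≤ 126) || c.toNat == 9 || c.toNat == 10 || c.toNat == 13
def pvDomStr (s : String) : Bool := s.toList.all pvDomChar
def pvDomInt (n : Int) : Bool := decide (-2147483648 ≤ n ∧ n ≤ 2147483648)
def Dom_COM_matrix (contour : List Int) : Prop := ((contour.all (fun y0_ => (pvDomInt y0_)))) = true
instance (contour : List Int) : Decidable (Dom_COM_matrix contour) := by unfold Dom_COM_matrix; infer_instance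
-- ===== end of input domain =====

-- B computes each pairwise comparison once (one triangular pass, mirroring the lower triangle); same return value as A's two full nested passes.

-- ===== PORT A =====
-- literal port: com starts as one empty row per element, then the nested loops append "0"/"-"/"+" into row i
def COM_matrix (contour : List Int) : List (List String) :=
  let com : List (List String) := contour.map (fun _ => [])
  (List.range contour.length).foldl (fun com i =>
    com.set i ((List.range contour.length).foldl (fun row x =>
      row ++ [if contour.getD i 0 = contour.getD x 0 then "0"
              else if contour.getD i 0 > contour.getD x 0 then "-" else "+"])
      (com.getD i []))) com

-- ===== PORT B =====
-- the _FLIP lookup table of Source B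
def pvFlip : PySem.Dict String String := PySem.Dict.ofList [("0", "0"), ("-", "+"), ("+", "-")]

def COM_matrix_alt (contour : List Int) : List (List String) :=
  let n := contour.length
  (List.range n).foldl (fun rows i =>
    let row := (List.range i).map (fun x => PySem.Dict.getD pvFlip ((rows.getD x []).getD i "") "")
    let row := (List.range' i (n - i)).foldl (fun row x =>
      row ++ [if contour.getD i 0 = contour.getD x 0 then "0"
              else if contour.getD i 0 > contour.getD x 0 then "-" else "+"]) row
    rows ++ [row]) []

-- ===== PRECONDITION & SPEC =====
def Spec_COM_matrix (contour : List Int) (out : List (List String)) : Prop := out = COM_matrix_alt contour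
instance (contour : List Int) (out : List (List String)) : Decidable (Spec_COM_matrix contour out) := by unfold Spec_COM_matrix; infer_instance

-- ===== CLAIM (what is proved, stated in full; the proofs are below) =====
def Claim_equal_COM_matrix : Prop := ∀ (contour : List Int), Dom_COM_matrix contour → Spec_COM_matrix contour (COM_matrix contour)

-- ===== LEMMAS AND PROOFS =====

-- row i of the comparison matrix, the common description both ports are shown to compute
def pvRow (c : List Int) (i : ℕ) : List String :=
  (List.range c.length).map (fun x =>
    if c.getD i 0 = c.getD x 0 then "0"
    else if c.getD i 0 > c.getD x 0 then "-" else "+")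

-- flipping the sign of a comparison via B's lookup table is comparing the other way round
theorem pv_flip_cmp (a b : Int) :
    PySem.Dict.getD pvFlip (if a = b then "0" else if a > b then "-" else "+") "" =
      (if b = a then "0" else if b > a then "-" else "+") := by
  rcases lt_trichotomy a b with h | h | h
  · simp [h.ne, h.not_gt, h, h.ne', pvFlip]; decide
  · simp [h]; decide
  · simp [h.ne', h, h.not_gt, h.ne]; decide

theorem range_split (n a b : ℕ) (h : a + b = n) :
    List.range a ++ List.range' a b = List.range n := by
  rw [List.range_eq_range', List.range_eq_range', ← h]
  simpa using (List.range'_append_1 (s := 0) (m := a) (n := b))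

-- A's outer loop: filling row i into a list that is correct before i and empty from i on
theorem pv_A_loop (G : ℕ → List String) :
    ∀ (b a : ℕ),
      (List.range' a b).foldl (fun com i => com.set i ((com.getD i []) ++ G i))
        ((List.range a).map G ++ List.replicate b []) =
      (List.range (a + b)).map G := by
  intro b
  induction b with
  | zero => intro a; simp
  | succ b ih =>
    intro a
    rw [List.range'_succ, List.foldl_cons]
    have hget : (((List.range a).map G ++ List.replicate (b+1) []) : List (List String)).getD a [] = [] := by
      simp [List.getD]
    have hset : (((List.range a).map G ++ List.replicate (b+1) []) : List (List String)).set a ([] ++ G a)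
        = (List.range (a+1)).map G ++ List.replicate b [] := by
      rw [List.set_append_right _ _ (by simp)]
      simp [List.range_succ, List.replicate_succ]
    rw [hget, hset]
    rw [show a + (b+1) = (a+1) + b by omega]
    exact ih (a+1)

-- B's loop: every produced row is pvRow, the lower triangle being read back from earlier rows
theorem pv_B_loop (c : List Int) :
    ∀ (b a : ℕ), a + b = c.length →
      (List.range' a b).foldl (fun rows i =>
        rows ++ [(List.range i).map (fun x => PySem.Dict.getD pvFlip ((rows.getD x []).getD i "") "") ++
          (List.range' i (c.length - i)).map (fun x =>
            if c.getD i 0 = c.getD x 0 then "0"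
            else if c.getD i 0 > c.getD x 0 then "-" else "+")])
        ((List.range a).map (pvRow c)) =
      (List.range c.length).map (pvRow c) := by
  intro b
  induction b with
  | zero => intro a h; simp at h; simp [h]
  | succ b ih =>
    intro a h
    have ha : a < c.length := by omega
    rw [List.range'_succ, List.foldl_cons]
    have hrow0 : (List.range a).map (fun x =>
        PySem.Dict.getD pvFlip ((((List.range a).map (pvRow c)).getD x []).getD a "") "") =
        (List.range a).map (fun x =>
          if c.getD a 0 = c.getD x 0 then "0"
          else if c.getD a 0 > c.getD x 0 then "-" else "+") := by
      apply List.map_congr_left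
      intro x hx
      rw [List.mem_range] at hx
      rw [PySem.List.getD_map_range _ _ _ _ hx]
      rw [pvRow, PySem.List.getD_map_range _ _ _ _ ha]
      exact pv_flip_cmp _ _
    rw [hrow0]
    have hrow : ((List.range a).map (fun x =>
          if c.getD a 0 = c.getD x 0 then "0"
          else if c.getD a 0 > c.getD x 0 then "-" else "+") ++
        (List.range' a (c.length - a)).map (fun x =>
          if c.getD a 0 = c.getD x 0 then "0"
          else if c.getD a 0 > c.getD x 0 then "-" else "+")) = pvRow c a := by
      rw [← List.map_append, range_split c.length a (c.length - a) (by omega), pvRow]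
    rw [hrow]
    have hr : (List.range a).map (pvRow c) ++ [pvRow c a] = (List.range (a+1)).map (pvRow c) := by
      simp [List.range_succ]
    rw [hr]
    exact ih (a+1) (by omega)

theorem pv_A_eq (c : List Int) : COM_matrix c = (List.range c.length).map (pvRow c) := by
  unfold COM_matrix
  simp only [PySem.List.foldl_append_singleton_eq_map, List.map_const']
  show (List.range c.length).foldl (fun com i => com.set i ((com.getD i []) ++ pvRow c i))
      (List.replicate c.length []) = (List.range c.length).map (pvRow c)
  have h2 := pv_A_loop (pvRow c) c.length 0
  simp only [List.range_zero, List.map_nil, List.nil_append, Nat.zero_add,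
    ← List.range_eq_range'] at h2
  exact h2

theorem pv_B_eq (c : List Int) : COM_matrix_alt c = (List.range c.length).map (pvRow c) := by
  unfold COM_matrix_alt
  simp only [PySem.List.foldl_append_singleton_eq_map]
  have := pv_B_loop c c.length 0 (by omega)
  rw [List.range_eq_range' (n := c.length)] at this ⊢
  simpa using this

-- ===== VERDICT (by name: the statement is the Claim_ definition above) =====
theorem COM_matrix_spec : Claim_equal_COM_matrix := by
  intro c _
  unfold Spec_COM_matrix
  rw [pv_A_eq, pv_B_eq]
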